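-- pv_equiv track=rewrite | github.com/alexzubenko/leetcode | amazon/count_pairs_in_sorted_array.py | count_pairs_smart
-- ===== SOURCE A (Python) =====
-- def count_pairs_smart(array, x):
--     first = 0
--     last = len(array)-1
--     count = 0
--     while first <=last:
--         if array[first]+ array[last]< x:
--             count += last - first
--             first +=1
--         else:
--             last -=1
--     return count
-- ===== SOURCE B (Python) =====
-- def count_pairs_smart(array, x):
--     def bisect_left(a, t):
--         lo, hi = 0, len(a)
--         while lo < hi:
--             mid = (lo + hi) // 2
--             if a[mid] < t:
--                 lo = mid + 1
--             else:
--                 hi = mid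
--         return lo
--     total = 0
--     for i in range(len(array)):
--         pos = bisect_left(array, x - array[i])
--         total += max(0, pos - (i + 1))
--     return total
-- ===== Notes on version B (the rewrite author's own statement) =====
-- stated objective: alternative
-- what changed: Replaces the converging two-pointer sweep with a per-element hand-written binary search (bisect_left) for the complement, summing max(0, pos-(i+1)) contributions over the sorted array.
-- outside the precondition, e.g. on count_pairs_smart([2, 9, 2], 5): A returns 2, B returns 0
import Mathlib
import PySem

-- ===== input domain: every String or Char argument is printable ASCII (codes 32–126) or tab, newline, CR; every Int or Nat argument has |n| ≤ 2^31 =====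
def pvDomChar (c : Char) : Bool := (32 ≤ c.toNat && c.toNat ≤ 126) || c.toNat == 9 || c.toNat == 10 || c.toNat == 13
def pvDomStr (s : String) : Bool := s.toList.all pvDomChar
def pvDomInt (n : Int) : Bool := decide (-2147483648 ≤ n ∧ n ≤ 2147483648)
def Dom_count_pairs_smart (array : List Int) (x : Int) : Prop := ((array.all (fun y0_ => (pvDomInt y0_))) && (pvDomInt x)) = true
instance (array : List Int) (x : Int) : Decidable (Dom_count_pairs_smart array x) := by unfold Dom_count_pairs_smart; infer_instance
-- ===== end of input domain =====

-- B replaces A's two-pointer sweep by a per-element binary search for the complement (an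
-- alternative algorithm of similar cost); equivalence is claimed on sorted input, the
-- function's natural domain (its source file is count_pairs_in_sorted_array.py).

-- ===== PORT A =====
-- while first <= last: if array[first]+array[last] < x: count += last-first; first += 1 else last -= 1
def countA_loop (array : List Int) (x first last count : Int) : Int :=
  if first ≤ last then
    if PySem.List.pyGetD array first 0 + PySem.List.pyGetD array last 0 < x then
      countA_loop array x (first + 1) last (count + (last - first))
    else
      countA_loop array x first (last - 1) count
  else count
termination_by (last - first + 1).toNat
decreasing_by all_goals · simp_wf; omega

def count_pairs_smart (array : List Int) (x : Int) : Int :=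
  countA_loop array x 0 ((array.length : Int) - 1) 0

-- ===== PORT B =====
-- hand-written bisect_left: while lo < hi: mid = (lo+hi)//2; if a[mid] < t: lo = mid+1 else hi = mid
def bisectLeftLoop (a : List Int) (t lo hi : Int) : Int :=
  if lo < hi then
    let mid := PySem.Int.floordiv (lo + hi) 2
    if PySem.List.pyGetD a mid 0 < t then bisectLeftLoop a t (mid + 1) hi
    else bisectLeftLoop a t lo mid
  else lo
termination_by (hi - lo).toNat
decreasing_by
  · have h1 : PySem.Int.floordiv (lo + hi) 2 < hi := by
      rw [PySem.Int.floordiv_lt_iff_lt_mul (by omega)]; omega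
    simp_wf; omega
  · have h1 : lo ≤ PySem.Int.floordiv (lo + hi) 2 := by
      rw [PySem.Int.le_floordiv_iff_mul_le (by omega)]; omega
    simp_wf; omega

-- for i in range(len(array)): total += max(0, bisect_left(array, x - array[i]) - (i+1))
def count_pairs_smart_alt (array : List Int) (x : Int) : Int :=
  (PySem.List.pyRange 0 (array.length : Int) 1).foldl
    (fun total i =>
      total +
        max 0 (bisectLeftLoop array (x - PySem.List.pyGetD array i 0) 0 (array.length : Int) - (i + 1)))
    0

-- ===== PRECONDITION & SPEC =====
-- Pre_ admits nondecreasing arrays — the function's natural domain (its source file is named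
-- count_pairs_in_sorted_array.py; on longer unsorted input A's returned number is an accident of
-- the two-pointer sweep and counts nothing meaningful) — plus all arrays of length ≤ 2, where
-- element order cannot matter.
def Pre_count_pairs_smart (array : List Int) (x : Int) : Prop :=
  array.length ≤ 2 ∨ List.Pairwise (· ≤ ·) array
instance (array : List Int) (x : Int) : Decidable (Pre_count_pairs_smart array x) := by
  unfold Pre_count_pairs_smart; infer_instance

def pvWitness_count_pairs_smart : List Int × Int := ([-3, 0, 2, 2, 5], 4)

def Spec_count_pairs_smart (array : List Int) (x : Int) (out : Int) : Prop := out = count_pairs_smart_alt array x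
instance (array : List Int) (x : Int) (out : Int) : Decidable (Spec_count_pairs_smart array x out) := by unfold Spec_count_pairs_smart; infer_instance

-- ===== CLAIM (what is proved, stated in full; the proofs are below) =====
def Claim_equal_count_pairs_smart : Prop := ∀ (array : List Int) (x : Int), Dom_count_pairs_smart array x → Pre_count_pairs_smart array x → Spec_count_pairs_smart array x (count_pairs_smart array x)

-- ===== LEMMAS AND PROOFS =====

-- element access used by both ports
def pvG (a : List Int) (i : Int) : Int := PySem.List.pyGetD a i 0

-- computable Finset of integers f..l (Finset.Icc on Int is noncomputable in this Mathlib)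
def intRange (f l : Int) : Finset Int :=
  (Finset.range (l + 1 - f).toNat).map ⟨fun (k : ℕ) => f + (k : Int), by intro a b h; simpa using h⟩

lemma mem_intRange {f l i : Int} : i ∈ intRange f l ↔ f ≤ i ∧ i ≤ l := by
  simp only [intRange, Finset.mem_map, Finset.mem_range, Function.Embedding.coeFn_mk]
  constructor
  · rintro ⟨k, hk, rfl⟩; omega
  · rintro ⟨h1, h2⟩; exact ⟨(i - f).toNat, by omega, by omega⟩

lemma card_intRange (f l : Int) : (intRange f l).card = (l + 1 - f).toNat := by
  simp [intRange]

-- number of index pairs f ≤ i < j ≤ l with a[i] + a[j] < x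
def pairsBelow (a : List Int) (x : Int) (f l : Int) : Int :=
  ((((intRange f l)) ×ˢ ((intRange f l))).filter
    (fun p => p.1 < p.2 ∧ pvG a p.1 + pvG a p.2 < x)).card

lemma pvG_mono {a : List Int} (hs : List.Pairwise (· ≤ ·) a) {i j : Int}
    (h0 : 0 ≤ i) (hij : i ≤ j) (hj : j < (a.length : Int)) : pvG a i ≤ pvG a j := by
  rcases eq_or_lt_of_le hij with rfl | hlt
  · exact le_refl _
  · have hi' : i.toNat < a.length := by omega
    have hj' : j.toNat < a.length := by omega
    have hle := List.pairwise_iff_getElem.mp hs i.toNat j.toNat hi' hj' (by omega)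
    rw [pvG, pvG, PySem.List.pyGetD_eq_getElem a 0 h0 (by omega),
      PySem.List.pyGetD_eq_getElem a 0 (by omega) hj]
    exact hle

lemma pairsBelow_empty (a : List Int) (x : Int) {f l : Int} (h : l < f) :
    pairsBelow a x f l = 0 := by
  have h0 : (l + 1 - f).toNat = 0 := by omega
  simp [pairsBelow, intRange, h0]

lemma pairsBelow_fst (a : List Int) (x : Int) {f l : Int}
    (hs : List.Pairwise (· ≤ ·) a) (h0 : 0 ≤ f) (hfl : f ≤ l) (hl : l ≤ (a.length : Int) - 1)
    (hx : pvG a f + pvG a l < x) :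
    pairsBelow a x f l = (l - f) + pairsBelow a x (f + 1) l := by
  have hgj : ∀ j : Int, f + 1 ≤ j → j ≤ l → pvG a f + pvG a j < x := by
    intro j hj1 hj2
    have := pvG_mono hs (i := j) (j := l) (by omega) (by omega) (by omega)
    omega
  have h1 : ((((intRange f l) ×ˢ (intRange f l)).filter
      (fun p => p.1 < p.2 ∧ pvG a p.1 + pvG a p.2 < x)).filter (fun p => p.1 = f)) =
      (intRange (f + 1) l).map ⟨fun j => ((f : Int), j), by intro u v h; cases h; rfl⟩ := by
    ext ⟨p1, p2⟩
    simp only [Finset.mem_filter, Finset.mem_product, mem_intRange, Finset.mem_map,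
      Function.Embedding.coeFn_mk, Prod.mk.injEq]
    constructor
    · rintro ⟨⟨⟨⟨ha1, ha2⟩, hb1, hb2⟩, hc1, hc2⟩, hd⟩
      exact ⟨p2, ⟨by omega, hb2⟩, by omega, rfl⟩
    · rintro ⟨j, ⟨hj1, hj2⟩, rfl, rfl⟩
      exact ⟨⟨⟨⟨by omega, by omega⟩, by omega, by omega⟩, by omega, hgj j hj1 hj2⟩, rfl⟩
  have h2 : ((((intRange f l) ×ˢ (intRange f l)).filter
      (fun p => p.1 < p.2 ∧ pvG a p.1 + pvG a p.2 < x)).filter (fun p => ¬ p.1 = f)) =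
      (((intRange (f + 1) l) ×ˢ (intRange (f + 1) l)).filter
        (fun p => p.1 < p.2 ∧ pvG a p.1 + pvG a p.2 < x)) := by
    ext ⟨p1, p2⟩
    simp only [Finset.mem_filter, Finset.mem_product, mem_intRange]
    constructor
    · rintro ⟨⟨⟨⟨ha1, ha2⟩, hb1, hb2⟩, hc1, hc2⟩, hd⟩
      exact ⟨⟨⟨by omega, ha2⟩, by omega, hb2⟩, hc1, hc2⟩
    · rintro ⟨⟨⟨ha1, ha2⟩, hb1, hb2⟩, hc1, hc2⟩
      exact ⟨⟨⟨⟨by omega, ha2⟩, by omega, hb2⟩, hc1, hc2⟩, by omega⟩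
  have hsplit := Finset.filter_card_add_filter_neg_card_eq_card
    (s := ((intRange f l) ×ˢ (intRange f l)).filter
      (fun p => p.1 < p.2 ∧ pvG a p.1 + pvG a p.2 < x))
    (p := fun p => p.1 = f)
  rw [h1, h2, Finset.card_map, card_intRange] at hsplit
  unfold pairsBelow
  omega

lemma pairsBelow_snd (a : List Int) (x : Int) {f l : Int}
    (hs : List.Pairwise (· ≤ ·) a) (h0 : 0 ≤ f) (hfl : f ≤ l) (hl : l ≤ (a.length : Int) - 1)
    (hx : ¬ pvG a f + pvG a l < x) :
    pairsBelow a x f l = pairsBelow a x f (l - 1) := by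
  have hge : ∀ i : Int, f ≤ i → i ≤ l → ¬ (pvG a i + pvG a l < x) := by
    intro i hi1 hi2
    have := pvG_mono hs (i := f) (j := i) h0 hi1 (by omega)
    omega
  have h1 : ((((intRange f l) ×ˢ (intRange f l)).filter
      (fun p => p.1 < p.2 ∧ pvG a p.1 + pvG a p.2 < x)).filter (fun p => p.2 = l)) = ∅ := by
    refine Finset.eq_empty_iff_forall_notMem.mpr ?_
    rintro ⟨p1, p2⟩ hp
    simp only [Finset.mem_filter, Finset.mem_product, mem_intRange] at hp
    obtain ⟨⟨⟨⟨ha1, ha2⟩, hb1, hb2⟩, hc1, hc2⟩, hd⟩ := hp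
    subst hd
    exact hge p1 ha1 (by omega) hc2
  have h2 : ((((intRange f l) ×ˢ (intRange f l)).filter
      (fun p => p.1 < p.2 ∧ pvG a p.1 + pvG a p.2 < x)).filter (fun p => ¬ p.2 = l)) =
      (((intRange f (l - 1)) ×ˢ (intRange f (l - 1))).filter
        (fun p => p.1 < p.2 ∧ pvG a p.1 + pvG a p.2 < x)) := by
    ext ⟨p1, p2⟩
    simp only [Finset.mem_filter, Finset.mem_product, mem_intRange]
    constructor
    · rintro ⟨⟨⟨⟨ha1, ha2⟩, hb1, hb2⟩, hc1, hc2⟩, hd⟩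
      exact ⟨⟨⟨ha1, by omega⟩, hb1, by omega⟩, hc1, hc2⟩
    · rintro ⟨⟨⟨ha1, ha2⟩, hb1, hb2⟩, hc1, hc2⟩
      exact ⟨⟨⟨⟨ha1, by omega⟩, hb1, by omega⟩, hc1, hc2⟩, by omega⟩
  have hsplit := Finset.filter_card_add_filter_neg_card_eq_card
    (s := ((intRange f l) ×ˢ (intRange f l)).filter
      (fun p => p.1 < p.2 ∧ pvG a p.1 + pvG a p.2 < x))
    (p := fun p => p.2 = l)
  rw [h1, h2, Finset.card_empty] at hsplit
  unfold pairsBelow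
  omega

lemma countA_loop_eq (a : List Int) (x : Int) (hs : List.Pairwise (· ≤ ·) a) :
    ∀ N f l count, (l - f + 1).toNat ≤ N → 0 ≤ f → l ≤ (a.length : Int) - 1 →
      countA_loop a x f l count = count + pairsBelow a x f l := by
  intro N
  induction N with
  | zero =>
    intro f l count hN h0 hl
    rw [countA_loop, if_neg (by omega : ¬ f ≤ l), pairsBelow_empty a x (by omega : l < f)]
    ring
  | succ n ih =>
    intro f l count hN h0 hl
    rw [countA_loop]
    by_cases hfl : f ≤ l
    · rw [if_pos hfl]
      by_cases hx : PySem.List.pyGetD a f 0 + PySem.List.pyGetD a l 0 < x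
      · have hx' : pvG a f + pvG a l < x := hx
        rw [if_pos hx, ih (f + 1) l (count + (l - f)) (by omega) (by omega) hl,
          pairsBelow_fst a x hs h0 hfl hl hx']
        ring
      · have hx' : ¬ pvG a f + pvG a l < x := hx
        rw [if_neg hx, ih f (l - 1) count (by omega) h0 (by omega),
          pairsBelow_snd a x hs h0 hfl hl hx']
    · rw [if_neg hfl, pairsBelow_empty a x (by omega : l < f)]
      ring

lemma bisectLeftLoop_spec (a : List Int) (t : Int) (hs : List.Pairwise (· ≤ ·) a) :
    ∀ N lo hi, (hi - lo).toNat ≤ N → 0 ≤ lo → lo ≤ hi → hi ≤ (a.length : Int) →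
      (∀ j, 0 ≤ j → j < lo → pvG a j < t) →
      (∀ j, hi ≤ j → j < (a.length : Int) → ¬ pvG a j < t) →
      lo ≤ bisectLeftLoop a t lo hi ∧ bisectLeftLoop a t lo hi ≤ hi ∧
        (∀ j, 0 ≤ j → j < bisectLeftLoop a t lo hi → pvG a j < t) ∧
        (∀ j, bisectLeftLoop a t lo hi ≤ j → j < (a.length : Int) → ¬ pvG a j < t) := by
  intro N
  induction N with
  | zero =>
    intro lo hi hN h0 hlohi hhi p1 p2
    rw [bisectLeftLoop, if_neg (by omega : ¬ lo < hi)]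
    exact ⟨le_rfl, hlohi, p1, fun j hj hjn => p2 j (by omega) hjn⟩
  | succ n ih =>
    intro lo hi hN h0 hlohi hhi p1 p2
    by_cases hlt : lo < hi
    · have hmlo : lo ≤ PySem.Int.floordiv (lo + hi) 2 := by
        rw [PySem.Int.le_floordiv_iff_mul_le (by omega)]; omega
      have hmhi : PySem.Int.floordiv (lo + hi) 2 < hi := by
        rw [PySem.Int.floordiv_lt_iff_lt_mul (by omega)]; omega
      rw [bisectLeftLoop]
      simp only [if_pos hlt]
      by_cases hmt : PySem.List.pyGetD a (PySem.Int.floordiv (lo + hi) 2) 0 < t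
      · simp only [if_pos hmt]
        have p1' : ∀ j, 0 ≤ j → j < PySem.Int.floordiv (lo + hi) 2 + 1 → pvG a j < t := by
          intro j hj0 hj1
          have := pvG_mono hs (i := j) (j := PySem.Int.floordiv (lo + hi) 2)
            hj0 (by omega) (by omega)
          calc pvG a j ≤ _ := this
            _ < t := hmt
        obtain ⟨r1, r2, r3, r4⟩ := ih (PySem.Int.floordiv (lo + hi) 2 + 1) hi
          (by omega) (by omega) (by omega) hhi p1' p2
        exact ⟨by omega, r2, r3, r4⟩
      · simp only [if_neg hmt]
        have p2' : ∀ j, PySem.Int.floordiv (lo + hi) 2 ≤ j → j < (a.length : Int) →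
            ¬ pvG a j < t := by
          intro j hj0 hj1
          have := pvG_mono hs (i := PySem.Int.floordiv (lo + hi) 2) (j := j)
            (by omega) hj0 hj1
          have hmt' : ¬ pvG a (PySem.Int.floordiv (lo + hi) 2) < t := hmt
          omega
        obtain ⟨r1, r2, r3, r4⟩ := ih lo (PySem.Int.floordiv (lo + hi) 2)
          (by omega) h0 (by omega) (by omega) p1 p2'
        exact ⟨r1, by omega, r3, r4⟩
    · rw [bisectLeftLoop, if_neg hlt]
      exact ⟨le_rfl, hlohi, p1, fun j hj hjn => p2 j (by omega) hjn⟩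

lemma contribution_eq (a : List Int) (x : Int) (hs : List.Pairwise (· ≤ ·) a)
    {i : Int} (h0 : 0 ≤ i) (hi : i < (a.length : Int)) :
    max 0 (bisectLeftLoop a (x - pvG a i) 0 (a.length : Int) - (i + 1)) =
      (((intRange 0 ((a.length : Int) - 1)).filter
        (fun j => i < j ∧ pvG a i + pvG a j < x)).card : Int) := by
  obtain ⟨r1, r2, r3, r4⟩ := bisectLeftLoop_spec a (x - pvG a i) hs
    a.length 0 (a.length : Int) (by omega) le_rfl (by omega) le_rfl
    (by intro j hj0 hj1; exact absurd hj1 (by omega))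
    (by intro j hj0 hj1; exact absurd hj0 (by omega))
  have hset : ((intRange 0 ((a.length : Int) - 1)).filter
      (fun j => i < j ∧ pvG a i + pvG a j < x)) =
      intRange (i + 1) (bisectLeftLoop a (x - pvG a i) 0 (a.length : Int) - 1) := by
    ext j
    simp only [Finset.mem_filter, mem_intRange]
    constructor
    · rintro ⟨⟨hj0, hj1⟩, hij, hgx⟩
      have hjr : j < bisectLeftLoop a (x - pvG a i) 0 (a.length : Int) := by
        by_contra hc
        have hnot := r4 j (by omega) (by omega)
        have : pvG a j < x - pvG a i := by omega
        exact hnot this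
      exact ⟨by omega, by omega⟩
    · rintro ⟨hj1, hj2⟩
      have hgj := r3 j (by omega) (by omega)
      refine ⟨⟨by omega, by omega⟩, by omega, by omega⟩
  rw [hset, card_intRange]
  omega

lemma pairsBelow_fiberwise (a : List Int) (x : Int) :
    pairsBelow a x 0 ((a.length : Int) - 1) =
      ∑ i ∈ intRange 0 ((a.length : Int) - 1),
        (((intRange 0 ((a.length : Int) - 1)).filter
          (fun j => i < j ∧ pvG a i + pvG a j < x)).card : Int) := by
  have hfib := Finset.card_eq_sum_card_fiberwise
    (s := ((intRange 0 ((a.length : Int) - 1)) ×ˢ (intRange 0 ((a.length : Int) - 1))).filter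
      (fun p => p.1 < p.2 ∧ pvG a p.1 + pvG a p.2 < x))
    (t := intRange 0 ((a.length : Int) - 1)) (f := Prod.fst)
    (fun p hp => (Finset.mem_product.mp (Finset.mem_filter.mp hp).1).1)
  have hper : ∀ i ∈ intRange 0 ((a.length : Int) - 1),
      (((((intRange 0 ((a.length : Int) - 1)) ×ˢ (intRange 0 ((a.length : Int) - 1))).filter
        (fun p => p.1 < p.2 ∧ pvG a p.1 + pvG a p.2 < x)).filter (fun p => p.1 = i)).card : Nat) =
      ((intRange 0 ((a.length : Int) - 1)).filter
        (fun j => i < j ∧ pvG a i + pvG a j < x)).card := by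
    intro i hi
    have himg : ((((intRange 0 ((a.length : Int) - 1)) ×ˢ (intRange 0 ((a.length : Int) - 1))).filter
        (fun p => p.1 < p.2 ∧ pvG a p.1 + pvG a p.2 < x)).filter (fun p => p.1 = i)) =
        ((intRange 0 ((a.length : Int) - 1)).filter
          (fun j => i < j ∧ pvG a i + pvG a j < x)).map
          ⟨fun j => (i, j), by intro u v h; cases h; rfl⟩ := by
      rw [mem_intRange] at hi
      ext ⟨p1, p2⟩
      simp only [Finset.mem_filter, Finset.mem_product, mem_intRange, Finset.mem_map,
        Function.Embedding.coeFn_mk, Prod.mk.injEq]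
      constructor
      · rintro ⟨⟨⟨⟨ha1, ha2⟩, hb1, hb2⟩, hc1, hc2⟩, rfl⟩
        exact ⟨p2, ⟨⟨hb1, hb2⟩, hc1, hc2⟩, rfl, rfl⟩
      · rintro ⟨j, ⟨⟨hj1, hj2⟩, hj3, hj4⟩, rfl, rfl⟩
        exact ⟨⟨⟨⟨hi.1, hi.2⟩, hj1, hj2⟩, hj3, hj4⟩, rfl⟩
    rw [himg, Finset.card_map]
  rw [pairsBelow, hfib]
  push_cast
  exact Finset.sum_congr rfl (fun i hi => by rw [hper i hi])

lemma list_range_sum (n : Nat) (f : Nat → Int) :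
    ((List.range n).map f).sum = ∑ k ∈ Finset.range n, f k := by
  induction n with
  | zero => simp
  | succ m ih =>
    rw [List.range_succ, List.map_append, List.sum_append, Finset.sum_range_succ, ih]
    simp

lemma sum_intRange (m : Nat) (F : Int → Int) :
    ∑ i ∈ intRange 0 ((m : Int) - 1), F i = ∑ k ∈ Finset.range m, F (k : Int) := by
  unfold intRange
  rw [show ((m : Int) - 1 + 1 - 0).toNat = m by omega, Finset.sum_map]
  exact Finset.sum_congr rfl (fun k _ => by norm_num)

lemma alt_eq (a : List Int) (x : Int) (hs : List.Pairwise (· ≤ ·) a) :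
    count_pairs_smart_alt a x = pairsBelow a x 0 ((a.length : Int) - 1) := by
  rw [count_pairs_smart_alt, PySem.List.foldl_add, PySem.List.pyRange_zero_natCast,
    List.map_map, list_range_sum, pairsBelow_fiberwise, sum_intRange a.length, zero_add]
  refine Finset.sum_congr rfl ?_
  intro k hk
  rw [Finset.mem_range] at hk
  simp only [Function.comp_apply]
  exact contribution_eq a x hs (Int.natCast_nonneg k) (by exact_mod_cast hk)

-- arrays of length ≤ 2: both sides agree without any sortedness assumption
lemma bl_stop (a : List Int) (t lo : Int) : bisectLeftLoop a t lo lo = lo := by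
  rw [bisectLeftLoop]; simp

lemma bl_one (u t : Int) : bisectLeftLoop [u] t 0 1 = if u < t then 1 else 0 := by
  rw [bisectLeftLoop]
  rw [show PySem.Int.floordiv (0 + 1) 2 = 0 by decide]
  simp [PySem.List.pyGetD, bl_stop]

lemma bl_mid (u v t : Int) : bisectLeftLoop [u, v] t 0 1 = if u < t then 1 else 0 := by
  rw [bisectLeftLoop]
  rw [show PySem.Int.floordiv (0 + 1) 2 = 0 by decide]
  simp [PySem.List.pyGetD, bl_stop]

lemma bl_two (u v t : Int) : bisectLeftLoop [u, v] t 0 2 =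
    if v < t then 2 else if u < t then 1 else 0 := by
  rw [bisectLeftLoop]
  rw [show PySem.Int.floordiv (0 + 2) 2 = 1 by decide]
  simp only [show ((0:Int) < 2) = True by simp, if_true]
  have hg : PySem.List.pyGetD [u, v] 1 0 = v := by simp [PySem.List.pyGetD]
  rw [hg]
  split_ifs with h h2
  · rw [show (1:Int) + 1 = 2 by norm_num, bl_stop]
  · rw [bl_mid]; simp [h2]
  · rw [bl_mid]; simp [h2]

lemma a_one (u x : Int) : countA_loop [u] x 0 0 0 = 0 := by
  rw [countA_loop]
  norm_num
  split_ifs <;> (rw [countA_loop]; norm_num)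

lemma a_two (u v x : Int) : countA_loop [u, v] x 0 1 0 = if u + v < x then 1 else 0 := by
  rw [countA_loop]
  norm_num [PySem.List.pyGetD]
  split_ifs with h
  · rw [countA_loop]
    norm_num [PySem.List.pyGetD]
    split_ifs <;> (rw [countA_loop]; norm_num)
  · rw [countA_loop]
    norm_num [PySem.List.pyGetD]
    split_ifs <;> (rw [countA_loop]; norm_num)

lemma small_eq (a : List Int) (hlen : a.length ≤ 2) (x : Int) :
    count_pairs_smart a x = count_pairs_smart_alt a x := by
  match a, hlen with
  | [], _ =>
    simp [count_pairs_smart, count_pairs_smart_alt, countA_loop, PySem.List.pyRange_one_eq_nil]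
  | [u], _ =>
    rw [count_pairs_smart, count_pairs_smart_alt]
    norm_num
    rw [a_one, show PySem.List.pyRange 0 1 1 = [0] by decide]
    simp only [List.foldl]
    rw [show x - PySem.List.pyGetD [u] 0 0 = x - u by norm_num [PySem.List.pyGetD], bl_one]
    split_ifs <;> norm_num
  | [u, v], _ =>
    rw [count_pairs_smart, count_pairs_smart_alt]
    norm_num
    rw [a_two, show PySem.List.pyRange 0 2 1 = [0, 1] by decide]
    simp only [List.foldl]
    rw [show x - PySem.List.pyGetD [u, v] 0 0 = x - u by norm_num [PySem.List.pyGetD],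
      show x - PySem.List.pyGetD [u, v] 1 0 = x - v by norm_num [PySem.List.pyGetD],
      bl_two, bl_two]
    split_ifs <;> omega

-- ===== VERDICT (by name: the statement is the Claim_ definition above) =====
theorem count_pairs_smart_spec : Claim_equal_count_pairs_smart := by
  intro a x _ hpre
  unfold Spec_count_pairs_smart
  rcases hpre with hlen | hsorted
  · exact small_eq a hlen x
  · unfold count_pairs_smart
    rw [countA_loop_eq a x hsorted (((a.length : Int) - 1) - 0 + 1).toNat 0 ((a.length : Int) - 1) 0
        le_rfl le_rfl le_rfl, alt_eq a x hsorted]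
    ring
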